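-- pv_equiv track=rewrite | github.com/pritamleo841/GFG-CODE-SOLUTIONS-PYTHON | Difficulty: Hard/Largest Sum Cycle/largest-sum-cycle.py | largestSumCycle
-- ===== SOURCE A (Python) =====
-- def largestSumCycle(N, Edge):
--     #DFS+Cycle Detection
--     #TC - O(N), SC - O(N)
--     visited = [False] * N  # To track visited nodes
--     in_stack = [False] * N  # To track nodes in the current DFS path
--     cycle_sums = {}  # To store sum of cycles
--
--     def dfs(node, path):
--         # Track the current path for cycle detection
--         if in_stack[node]:
--             # A cycle is detected
--             cycle_index = path.index(node)  # Find the start of the cycle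
--             cycle_nodes = path[cycle_index:]  # Get the cycle nodes
--             cycle_sum = sum(cycle_nodes)  # Sum of node indexes in the cycle
--             return cycle_sum
--         if visited[node]:
--             return 0  # Already processed node, no cycle
--
--         # Mark the node as visited and part of the current DFS path
--         visited[node] = True
--         in_stack[node] = True
--         path.append(node)
--
--         next_node = Edge[node]
--         cycle_sum = 0
--         if next_node != -1:
--             cycle_sum = dfs(next_node, path)
--
--         # Backtrack
--         path.pop()
--         in_stack[node] = False
--
--         return cycle_sum
--
--     max_cycle_sum = -1
--     for i in range(N):
--         if not visited[i]:
--             cycle_sum = dfs(i, [])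
--             if cycle_sum > 0:
--                 max_cycle_sum = max(max_cycle_sum, cycle_sum)
--
--     return max_cycle_sum
-- ===== SOURCE B (Python) =====
-- def largestSumCycle(N, Edge):
--     # Iterative walk with a node->prefix-sum dict: cycle sum by one subtraction,
--     # no path list, no slicing, no backtracking.
--     seen = [False] * N
--
--     def cycle_sum_from(start):
--         node, total, acc = start, 0, {}
--         while node != -1:
--             if node in acc:
--                 return total - acc[node]
--             if seen[node]:
--                 return 0
--             seen[node] = True
--             acc[node] = total
--             total += node
--             node = Edge[node]
--         return 0
--
--     best = -1
--     for i in range(N):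
--         if not seen[i]:
--             s = cycle_sum_from(i)
--             if s > 0:
--                 best = max(best, s)
--     return best
-- ===== Notes on version B (the rewrite author's own statement) =====
-- stated objective: simpler
-- what changed: Replaces the recursive DFS with in_stack flags, a path list, path.index, slicing and summing the cycle tail by a flat iterative walk keeping only a running total and a node-to-prefix-sum dict, so the cycle sum is one subtraction and there is no path list, slicing or backtracking.
-- outside the precondition, e.g. on largestSumCycle(2, [0, -2]): A returns -1, B returns -1
import Mathlib
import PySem

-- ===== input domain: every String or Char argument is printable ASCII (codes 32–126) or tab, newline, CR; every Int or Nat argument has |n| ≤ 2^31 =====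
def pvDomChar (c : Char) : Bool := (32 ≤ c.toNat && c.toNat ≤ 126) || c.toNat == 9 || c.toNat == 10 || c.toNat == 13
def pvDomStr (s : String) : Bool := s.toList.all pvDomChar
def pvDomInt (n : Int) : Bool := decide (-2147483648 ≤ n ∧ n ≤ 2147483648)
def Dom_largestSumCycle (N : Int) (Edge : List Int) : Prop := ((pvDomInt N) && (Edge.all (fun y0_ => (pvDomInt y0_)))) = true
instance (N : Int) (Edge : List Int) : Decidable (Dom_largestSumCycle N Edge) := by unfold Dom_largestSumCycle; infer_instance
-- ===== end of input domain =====

-- B replaces A's recursive DFS (in_stack flags, path list, path.index, slice and sum of the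
-- cycle tail, backtracking) by a flat iterative walk keeping a running total and a
-- node→prefix-sum dict, so the cycle sum is one subtraction; same return value on Pre_.


-- ===== PORT A =====
-- A's inner dfs: recursion ported with fuel (N+1 suffices: each recursive step marks a fresh
-- node visited); the mutated arrays visited/in_stack are threaded and returned, path is local.
def dfsA (Edge : List Int) : Nat → Int → List Int → List Bool → List Bool → Int × List Bool × List Bool
  | 0, _, _, visited, instack => (0, visited, instack)
  | fuel+1, node, path, visited, instack =>
    if PySem.List.pyGetD instack node false then
      -- cycle detected: sum(path[path.index(node):])
      let ci : Int := ((PySem.List.index? path node).getD 0 : Nat)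
      ((PySem.List.slice path (some ci) none).sum, visited, instack)
    else if PySem.List.pyGetD visited node false then
      (0, visited, instack)
    else
      let visited' := PySem.List.pySetD visited node true
      let instack' := PySem.List.pySetD instack node true
      let path' := path ++ [node]
      let next := PySem.List.pyGetD Edge node (-1)
      let r := if next ≠ -1 then dfsA Edge fuel next path' visited' instack' else (0, visited', instack')
      (r.1, r.2.1, PySem.List.pySetD r.2.2 node false)   -- backtrack: in_stack[node] = False

def largestSumCycle (N : Int) (Edge : List Int) : Int :=
  ((PySem.List.pyRange 0 N 1).foldl (fun st i =>
      if PySem.List.pyGetD st.2.1 i false then st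
      else
        let r := dfsA Edge (N.toNat + 1) i [] st.2.1 st.2.2
        (if r.1 > 0 then max st.1 r.1 else st.1, r.2.1, r.2.2))
    ((-1 : Int), List.replicate N.toNat false, List.replicate N.toNat false)).1

-- ===== PORT B =====
-- B's inner while loop (cycle_sum_from): iterative walk with state (node, total, acc, seen),
-- fuel-bounded by the same N+1 bound; returns the cycle sum and the updated seen array.
def loopB (Edge : List Int) : Nat → Int → Int → PySem.Dict Int Int → List Bool → Int × List Bool
  | 0, _, _, _, seen => (0, seen)
  | fuel+1, node, total, acc, seen =>
    if node = -1 then (0, seen)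
    else if acc.contains node then (total - acc.getD node 0, seen)
    else if PySem.List.pyGetD seen node false then (0, seen)
    else loopB Edge fuel (PySem.List.pyGetD Edge node (-1)) (total + node)
          (acc.insert node total) (PySem.List.pySetD seen node true)

-- B's for loop over range(N): structural recursion on the remaining indices, carrying best/seen
def mainB (Edge : List Int) (fuel : Nat) : List Int → Int → List Bool → Int
  | [], best, _ => best
  | i :: rest, best, seen =>
    if PySem.List.pyGetD seen i false then mainB Edge fuel rest best seen
    else
      let r := loopB Edge fuel i 0 PySem.Dict.empty seen
      mainB Edge fuel rest (if r.1 > 0 then max best r.1 else best) r.2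

def largestSumCycle_alt (N : Int) (Edge : List Int) : Int :=
  mainB Edge (N.toNat + 1) (PySem.List.pyRange 0 N 1) (-1) (List.replicate N.toNat false)

-- ===== PRECONDITION & SPEC =====
-- Pre_ is the task's natural domain: Edge has an entry for every node and each of the first N
-- entries is -1 or a node index. Outside it A relies on Python's negative-list-index wraparound
-- or raises IndexError/ValueError; on the wrap inputs where A still returns, B happens to return
-- the same value (see the excluded example in the claim), but neither behaviour is specified.
def Pre_largestSumCycle (N : Int) (Edge : List Int) : Prop :=
  N ≤ (Edge.length : Int) ∧ ∀ e ∈ Edge.take N.toNat, e = -1 ∨ (0 ≤ e ∧ e < N)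
instance (N : Int) (Edge : List Int) : Decidable (Pre_largestSumCycle N Edge) := by
  unfold Pre_largestSumCycle; infer_instance

def pvWitness_largestSumCycle : Int × List Int := (4, [1, 2, 3, 1])

def Spec_largestSumCycle (N : Int) (Edge : List Int) (out : Int) : Prop := out = largestSumCycle_alt N Edge
instance (N : Int) (Edge : List Int) (out : Int) : Decidable (Spec_largestSumCycle N Edge out) := by unfold Spec_largestSumCycle; infer_instance

-- ===== CLAIM (what is proved, stated in full; the proofs are below) =====
def Claim_equal_largestSumCycle : Prop := ∀ (N : Int) (Edge : List Int), Dom_largestSumCycle N Edge → Pre_largestSumCycle N Edge → Spec_largestSumCycle N Edge (largestSumCycle N Edge)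

-- ===== LEMMAS AND PROOFS =====

-- setting an in-range entry back to its current (false) value restores the list
lemma pySetD_restore (l : List Bool) (i : Int) (h0 : 0 ≤ i) (hl : i.toNat < l.length)
    (hf : PySem.List.pyGetD l i false = false) :
    PySem.List.pySetD (PySem.List.pySetD l i true) i false = l := by
  have hi : i < (l.length : Int) := by omega
  rw [PySem.List.pySetD_of_nonneg _ false h0, PySem.List.pySetD_of_nonneg _ true h0, List.set_set]
  have hg : l[i.toNat] = false := by
    rw [PySem.List.pyGetD_eq_getElem l false h0 hi] at hf; exact hf
  calc l.set i.toNat false = l.set i.toNat (l[i.toNat]) := by rw [hg]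
    _ = l := List.set_getElem_self hl

-- B's walk stops at once (with sum 0) when the current node is -1, at any fuel
lemma loopB_neg_one (Edge : List Int) (fuel : Nat) (total : Int)
    (acc : PySem.Dict Int Int) (seen : List Bool) :
    loopB Edge fuel (-1) total acc seen = (0, seen) := by
  cases fuel <;> simp [loopB]

-- the main lockstep lemma: A's dfs and B's walk agree and dfs restores in_stack;
-- B's dict holds, for each node of A's path, the sum of the path strictly before it
lemma walk_eq (Edge : List Int) (N : Int)
    (hNE : N ≤ (Edge.length : Int))
    (hEdge : ∀ e ∈ Edge.take N.toNat, e = -1 ∨ (0 ≤ e ∧ e < N)) :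
    ∀ (fuel : Nat) (node : Int) (path : List Int) (visited instack : List Bool)
      (acc : PySem.Dict Int Int),
      0 ≤ node → node < N →
      instack.length = N.toNat →
      (∀ j : Int, 0 ≤ j → j < N → (PySem.List.pyGetD instack j false = true ↔ j ∈ path)) →
      (∀ x ∈ path, 0 ≤ x ∧ x < N) →
      (∀ j : Int, acc.get? j = (PySem.List.index? path j).map (fun k => (path.take k).sum)) →
      dfsA Edge fuel node path visited instack =
        ((loopB Edge fuel node path.sum acc visited).1,
         (loopB Edge fuel node path.sum acc visited).2, instack) := by
  intro fuel
  induction fuel with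
  | zero => intros; simp [dfsA, loopB]
  | succ fuel ih =>
    intro node path visited instack acc h0 hN hlen hstk hpath hacc
    have hne1 : ¬ (node = -1) := by omega
    have hmemiff : (PySem.List.pyGetD instack node false = true) ↔ node ∈ path := hstk node h0 hN
    have hcont : acc.contains node = PySem.List.pyGetD instack node false := by
      rw [PySem.Dict.contains_eq_isSome_get?, hacc node]
      by_cases hmem : node ∈ path
      · rw [hmemiff.2 hmem]
        obtain ⟨k, hk⟩ := Option.isSome_iff_exists.1 ((PySem.List.index?_isSome_iff path node).2 hmem)
        simp [hmem]
      · have hA : PySem.List.pyGetD instack node false = false := by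
          cases h : PySem.List.pyGetD instack node false
          · rfl
          · exact absurd (hmemiff.1 h) hmem
        rw [hA, (PySem.List.index?_eq_none_iff path node).2 hmem]
        rfl
    by_cases hmem : node ∈ path
    · -- both detect the cycle: A sums the slice, B subtracts the stored prefix sum
      have hA : PySem.List.pyGetD instack node false = true := hmemiff.2 hmem
      have hB : acc.contains node = true := by rw [hcont, hA]
      obtain ⟨k, hk⟩ := Option.isSome_iff_exists.1 ((PySem.List.index?_isSome_iff path node).2 hmem)
      have hklen : k ≤ path.length := by
        obtain ⟨hlt, -, -⟩ := PySem.List.getElem_of_index?_eq_some hk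
        omega
      have hgd : acc.getD node 0 = (path.take k).sum := by
        rw [PySem.Dict.getD_eq_get?_getD, hacc node, hk]; rfl
      have hslice : (PySem.List.slice path (some ((k : Nat) : Int)) none).sum
          = path.sum - (path.take k).sum := by
        rw [PySem.List.slice_from_natCast]
        have := List.sum_take_add_sum_drop path k
        omega
      simp only [dfsA, loopB, hA, hB, if_true, if_neg hne1, hk, Option.getD_some, hgd, hslice]
    · have hA : PySem.List.pyGetD instack node false = false := by
        cases h : PySem.List.pyGetD instack node false
        · rfl
        · exact absurd (hmemiff.1 h) hmem
      have hB : acc.contains node = false := by rw [hcont, hA]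
      by_cases hv : PySem.List.pyGetD visited node false = true
      · simp [dfsA, loopB, hA, hB, hv, hne1]
      · -- fresh node: mark it and follow the edge
        have hnlen : node.toNat < instack.length := by omega
        have hrestore := pySetD_restore instack node h0 hnlen hA
        have hilen : node < (Edge.length : Int) := lt_of_lt_of_le hN hNE
        have hsum' : path.sum + node = (path ++ [node]).sum := by simp
        by_cases hnn : PySem.List.pyGetD Edge node (-1) = -1
        · simp [dfsA, loopB, hA, hB, hv, hne1, hnn, hrestore, loopB_neg_one]
        · -- the next node is a real node index
          have hEd : PySem.List.pyGetD Edge node (-1) = Edge[node.toNat]'(by omega) :=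
            PySem.List.pyGetD_eq_getElem Edge (-1) h0 hilen
          have hnext : 0 ≤ PySem.List.pyGetD Edge node (-1) ∧ PySem.List.pyGetD Edge node (-1) < N := by
            have htk : Edge[node.toNat]'(by omega) ∈ Edge.take N.toNat := by
              have h1 : node.toNat < N.toNat := by omega
              have h2 : node.toNat < (Edge.take N.toNat).length := by
                simp [List.length_take]; omega
              have h3 : (Edge.take N.toNat)[node.toNat]'h2 = Edge[node.toNat]'(by omega) :=
                List.getElem_take
              exact h3 ▸ List.getElem_mem h2
            rcases hEdge _ htk with h | h
            · exact absurd (hEd.trans h) hnn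
            · rw [hEd]; exact h
          have hcast : ((node.toNat : Nat) : Int) = node := Int.toNat_of_nonneg h0
          have hstk' : ∀ j : Int, 0 ≤ j → j < N →
              (PySem.List.pyGetD (PySem.List.pySetD instack node true) j false = true ↔ j ∈ path ++ [node]) := by
            intro j hj0 hjN
            have hjc : ((j.toNat : Nat) : Int) = j := Int.toNat_of_nonneg hj0
            rw [← hcast, ← hjc,
              PySem.List.pyGetD_pySetD_natCast instack node.toNat j.toNat true false hnlen,
              hjc, hcast]
            by_cases hj : j = node
            · simp [hj]
            · have hne : ¬ (j.toNat = node.toNat) := by omega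
              rw [if_neg hne]
              simp [List.mem_append, hj, hstk j hj0 hjN]
          have hacc' : ∀ j : Int, (acc.insert node path.sum).get? j =
              (PySem.List.index? (path ++ [node]) j).map (fun k => ((path ++ [node]).take k).sum) := by
            intro j
            rw [PySem.Dict.get?_insert]
            by_cases hj : j = node
            · rw [if_pos hj, hj, PySem.List.index?_append_singleton_self path node hmem]
              simp
            · rw [if_neg hj, hacc j]
              by_cases hjp : j ∈ path
              · rw [PySem.List.index?_append_of_mem [node] hjp]
                obtain ⟨k, hk⟩ := Option.isSome_iff_exists.1
                  ((PySem.List.index?_isSome_iff path j).2 hjp)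
                obtain ⟨hlt, -, -⟩ := PySem.List.getElem_of_index?_eq_some hk
                rw [hk]
                simp [List.take_append_of_le_length (Nat.le_of_lt hlt)]
              · rw [(PySem.List.index?_eq_none_iff path j).2 hjp,
                  (PySem.List.index?_eq_none_iff (path ++ [node]) j).2 (by simp [hjp, hj])]
                rfl
          have hpath' : ∀ x ∈ path ++ [node], 0 ≤ x ∧ x < N := by
            intro x hx
            rcases List.mem_append.1 hx with h | h
            · exact hpath x h
            · rcases List.mem_singleton.1 h with rfl
              exact ⟨h0, hN⟩
          have hlen' : (PySem.List.pySetD instack node true).length = N.toNat := by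
            rw [PySem.List.length_pySetD]; exact hlen
          have IH := ih (PySem.List.pyGetD Edge node (-1)) (path ++ [node])
            (PySem.List.pySetD visited node true) (PySem.List.pySetD instack node true)
            (acc.insert node path.sum) hnext.1 hnext.2 hlen' hstk' hpath' hacc'
          simp only [dfsA, loopB, hA, hB, hv, if_neg hne1, if_false, Bool.false_eq_true,
            ne_eq, ite_not, if_neg hnn, hsum', IH]
          simp [hrestore]

-- A's top-level fold computes, in its first component, exactly B's main recursion,
-- while in_stack stays all-false between the start nodes
lemma fold_eq (Edge : List Int) (N : Int)
    (hNE : N ≤ (Edge.length : Int))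
    (hEdge : ∀ e ∈ Edge.take N.toNat, e = -1 ∨ (0 ≤ e ∧ e < N)) :
    ∀ (l : List Int) (best : Int) (visited : List Bool),
      (∀ i ∈ l, 0 ≤ i ∧ i < N) →
      (l.foldl (fun st i =>
          if PySem.List.pyGetD st.2.1 i false then st
          else
            let r := dfsA Edge (N.toNat + 1) i [] st.2.1 st.2.2
            (if r.1 > 0 then max st.1 r.1 else st.1, r.2.1, r.2.2))
        (best, visited, List.replicate N.toNat false)).1 =
      mainB Edge (N.toNat + 1) l best visited := by
  intro l
  induction l with
  | nil => intro best visited _; simp [mainB]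
  | cons i l ihl =>
    intro best visited hmem
    obtain ⟨hi0, hiN⟩ := hmem i (List.mem_cons_self)
    by_cases hv : PySem.List.pyGetD visited i false = true
    · simp only [List.foldl_cons, hv, if_true, mainB]
      exact ihl best visited (fun x hx => hmem x (List.mem_cons_of_mem _ hx))
    · have hw := walk_eq Edge N hNE hEdge (N.toNat + 1) i [] visited
        (List.replicate N.toNat false) PySem.Dict.empty hi0 hiN (by simp)
        (by
          intro j hj0 hjN
          rw [PySem.List.pyGetD_eq_getElem _ false hj0 (by simp; omega)]
          simp)
        (by simp)
        (by
          intro j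
          rw [PySem.Dict.get?_empty, (PySem.List.index?_eq_none_iff [] j).2 (by simp)]
          rfl)
      simp only [List.sum_nil] at hw
      simp only [List.foldl_cons, hv, if_false, Bool.false_eq_true, hw, mainB]
      exact ihl _ _ (fun x hx => hmem x (List.mem_cons_of_mem _ hx))

-- ===== VERDICT (by name: the statement is the Claim_ definition above) =====
theorem largestSumCycle_spec : Claim_equal_largestSumCycle := by
  intro N Edge _ hPre
  unfold Spec_largestSumCycle largestSumCycle largestSumCycle_alt
  exact fold_eq Edge N hPre.1 hPre.2 _ _ _
    (fun i hi => by
      have := (PySem.List.mem_pyRange_one).1 hi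
      exact ⟨this.1, this.2⟩)
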